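-- pv_equiv track=rewrite | github.com/yuyudhan/repo_analyzer | src/repo_analyzer/output/report_generator.py | _generate_latest_content
-- ===== SOURCE A (Python) =====
-- def _generate_latest_content(content: str) -> str:
--     """Generate content for the latest file (without timestamp in filepath)."""
--     # Extract content after the filepath comment
--     lines = content.split("\n")
--     start_index = 0
--
--     for i, line in enumerate(lines):
--         if line.startswith("# Technical Analysis:"):
--             start_index = i
--             break
--
--     if start_index > 0:
--         # Add new filepath comment
--         latest_content = "# FilePath: {repo_name}_latest.md\n\n"
--         latest_content += "\n".join(lines[start_index:])
--         return latest_content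
--
--     return content
-- ===== SOURCE B (Python) =====
-- def _generate_latest_content(content: str) -> str:
--     """Generate content for the latest file (without timestamp in filepath)."""
--     prefix = "# Technical Analysis:"
--     if content.startswith(prefix):
--         # marker on line 0: A's loop sets start_index = 0 and returns content unchanged
--         return content
--     idx = content.find("\n" + prefix)
--     if idx != -1:
--         return "# FilePath: {repo_name}_latest.md\n\n" + content[idx + 1:]
--     return content
-- ===== Notes on version B (the rewrite author's own statement) =====
-- stated objective: idiomatic
-- what changed: B drops the split-into-lines + enumerate/break scan entirely and instead does a direct substring search for ' ' + marker (with a startswith guard for a line-0 marker), slicing the original string from the found newline.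
import Mathlib
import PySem

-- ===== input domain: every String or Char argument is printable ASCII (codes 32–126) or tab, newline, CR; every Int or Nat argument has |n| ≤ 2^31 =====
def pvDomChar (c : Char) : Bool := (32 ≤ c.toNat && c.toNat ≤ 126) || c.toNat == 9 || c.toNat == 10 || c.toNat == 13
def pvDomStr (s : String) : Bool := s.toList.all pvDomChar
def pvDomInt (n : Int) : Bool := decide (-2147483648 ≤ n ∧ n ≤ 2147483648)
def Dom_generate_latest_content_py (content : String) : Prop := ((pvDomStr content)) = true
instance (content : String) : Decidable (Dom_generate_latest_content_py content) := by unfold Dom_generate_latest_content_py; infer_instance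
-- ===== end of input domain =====

-- B replaces A's split-into-lines + indexed scan by a direct substring search for "\n# Technical Analysis:" (idiomatic, no line list built).

-- ===== PORT A =====
-- the two string literals both Pythons share
def pvMarker : List Char := "# Technical Analysis:".toList
def pvHeader : List Char := "# FilePath: {repo_name}_latest.md\n\n".toList

-- A's 'for i, line in enumerate(lines): if line.startswith(...): start_index = i; break'
def pvFirstIdx : List (List Char) → Nat → Nat
  | [], _ => 0
  | line :: rest, i =>
      if PySem.Chars.startswith line pvMarker then i else pvFirstIdx rest (i + 1)

def generate_latest_content_py (content : String) : String :=
  let lines := PySem.Chars.splitOn content.toList ['\n']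
  let startIndex := pvFirstIdx lines 0
  if 0 < startIndex then
    String.ofList (pvHeader ++ PySem.Chars.join ['\n'] (lines.drop startIndex))
  else content

-- ===== PORT B =====
def generate_latest_content_py_alt (content : String) : String :=
  let cs := content.toList
  if PySem.Chars.startswith cs pvMarker then content
  else
    let idx := PySem.Chars.find cs ('\n' :: pvMarker)
    if idx ≠ -1 then
      String.ofList (pvHeader ++ PySem.Chars.slice cs (some (idx + 1)) none)
    else content

-- ===== PRECONDITION & SPEC =====
def Spec_generate_latest_content_py (content : String) (out : String) : Prop := out = generate_latest_content_py_alt content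
instance (content : String) (out : String) : Decidable (Spec_generate_latest_content_py content out) := by unfold Spec_generate_latest_content_py; infer_instance

-- ===== CLAIM (what is proved, stated in full; the proofs are below) =====
def Claim_equal_generate_latest_content_py : Prop := ∀ (content : String), Dom_generate_latest_content_py content → Spec_generate_latest_content_py content (generate_latest_content_py content)

-- ===== LEMMAS AND PROOFS =====

-- clean structural form of splitOn by a single '\n'
def pvSplit : List Char → List Char → List (List Char)
  | [], cur => [cur.reverse]
  | c :: rest, cur =>
      if c = '\n' then cur.reverse :: pvSplit rest [] else pvSplit rest (c :: cur)

theorem pvGo_eq_pvSplit : ∀ (fuel : Nat) (l cur : List Char) (acc : List (List Char)),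
    l.length ≤ fuel →
    PySem.Chars.splitOn.go ['\n'] fuel l cur acc = acc.reverse ++ pvSplit l cur := by
  intro fuel
  induction fuel with
  | zero =>
      intro l cur acc hl
      have : l = [] := List.eq_nil_of_length_eq_zero (Nat.le_zero.mp hl)
      subst this
      rw [PySem.Chars.splitOn.go]; simp [pvSplit]
  | succ n ih =>
      intro l cur acc hl
      cases l with
      | nil => rw [PySem.Chars.splitOn.go] <;> simp [pvSplit]
      | cons c rest =>
          rw [PySem.Chars.splitOn.go]
          by_cases hc : c = '\n'
          · subst hc
            simp only [List.isPrefixOf, BEq.rfl, Bool.true_and, if_true, List.length_singleton, List.drop_succ_cons, List.drop_zero]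
            rw [ih rest [] (cur.reverse :: acc) (by simpa using Nat.le_of_succ_le_succ hl)]
            simp [pvSplit]
          · have hpf : (['\n'].isPrefixOf (c :: rest)) = false := by
              simp [List.isPrefixOf]
              intro h; exact hc h.symm
            simp only [hpf, Bool.false_eq_true, if_false]
            rw [ih rest (c :: cur) acc (by simpa using Nat.le_of_succ_le_succ hl)]
            simp [pvSplit, hc]

theorem pvSplitOn_eq (cs : List Char) :
    PySem.Chars.splitOn cs ['\n'] = pvSplit cs [] := by
  have h : PySem.Chars.splitOn cs ['\n']
      = PySem.Chars.splitOn.go ['\n'] (cs.length + 1) cs [] [] := rfl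
  rw [h, pvGo_eq_pvSplit _ _ _ _ (Nat.le_succ _)]
  simp

theorem pvSplit_ne_nil : ∀ (l cur : List Char), pvSplit l cur ≠ [] := by
  intro l
  induction l with
  | nil => intro cur; simp [pvSplit]
  | cons c rest ih =>
      intro cur
      by_cases hc : c = '\n' <;> simp [pvSplit, hc, ih]

theorem pvSplit_no_nl : ∀ (l cur : List Char), '\n' ∉ l → pvSplit l cur = [cur.reverse ++ l] := by
  intro l
  induction l with
  | nil => intro cur _; simp [pvSplit]
  | cons c rest ih =>
      intro cur hm
      have hc : c ≠ '\n' := fun h => hm (h ▸ List.mem_cons_self ..)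
      have hr : '\n' ∉ rest := fun h => hm (List.mem_cons_of_mem _ h)
      simp [pvSplit, hc, ih _ hr]

theorem pvSplit_append : ∀ (a : List Char) (b cur : List Char), '\n' ∉ a →
    pvSplit (a ++ '\n' :: b) cur = (cur.reverse ++ a) :: pvSplit b [] := by
  intro a
  induction a with
  | nil => intro b cur _; simp [pvSplit]
  | cons c rest ih =>
      intro b cur hm
      have hc : c ≠ '\n' := fun h => hm (h ▸ List.mem_cons_self ..)
      have hr : '\n' ∉ rest := fun h => hm (List.mem_cons_of_mem _ h)
      simp [pvSplit, hc, ih b (c :: cur) hr]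

theorem pvJoin_pvSplit : ∀ (l cur : List Char),
    PySem.Chars.join ['\n'] (pvSplit l cur) = cur.reverse ++ l := by
  intro l
  induction l with
  | nil => intro cur; simp [pvSplit, PySem.Chars.join_singleton]
  | cons c rest ih =>
      intro cur
      by_cases hc : c = '\n'
      · subst hc
        simp only [pvSplit, if_true]
        cases hq : pvSplit rest [] with
        | nil => exact absurd hq (pvSplit_ne_nil rest [])
        | cons q qs =>
            rw [PySem.Chars.join_cons_cons]
            have := ih []
            rw [hq] at this
            simp [this]
      · simp only [pvSplit, hc, if_false]
        rw [ih (c :: cur)]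
        simp

theorem pvExists_split : ∀ (cs : List Char), '\n' ∈ cs →
    ∃ a b, cs = a ++ '\n' :: b ∧ '\n' ∉ a := by
  intro cs
  induction cs with
  | nil => intro h; exact absurd h (List.not_mem_nil)
  | cons c rest ih =>
      intro h
      by_cases hc : c = '\n'
      · exact ⟨[], rest, by simp [hc], by simp⟩
      · have hr : '\n' ∈ rest := by
          rcases List.mem_cons.mp h with h1 | h1
          · exact absurd h1.symm hc
          · exact h1
        obtain ⟨a, b, hab, ha⟩ := ih hr
        refine ⟨c :: a, b, by simp [hab], ?_⟩
        simp only [List.mem_cons]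
        rintro (h | h)
        · exact hc h.symm
        · exact ha h

theorem pvPrefix_head_nl : ∀ (a p b : List Char), '\n' ∉ p → '\n' ∉ a →
    (p <+: a ++ '\n' :: b ↔ p <+: a) := by
  intro a
  induction a with
  | nil =>
      intro p b hp _
      cases p with
      | nil => simp
      | cons x p' =>
          simp only [List.nil_append]
          constructor
          · intro h
            obtain ⟨hx, -⟩ := List.cons_prefix_cons.mp h
            exact absurd (hx ▸ List.mem_cons_self ..) hp
          · intro h; exact absurd h (by simp)
  | cons y a' ih =>
      intro p b hp ha
      cases p with
      | nil => simp
      | cons x p' =>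
          have hp' : '\n' ∉ p' := fun h => hp (List.mem_cons_of_mem _ h)
          have ha' : '\n' ∉ a' := fun h => ha (List.mem_cons_of_mem _ h)
          simp only [List.cons_append, List.cons_prefix_cons]
          rw [ih p' b hp' ha']

theorem pvInfix_iff_drop (sub s : List Char) : sub <:+: s ↔ ∃ j, sub <+: s.drop j := by
  rw [← PySem.Chars.isIn_iff_infix, ← PySem.Chars.exists_prefix_drop_iff_isIn]

theorem pvFind_eq_of (s sub : List Char) (j : Nat)
    (h1 : sub <+: s.drop j) (h2 : ∀ i < j, ¬ sub <+: s.drop i) :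
    PySem.Chars.find s sub = (j : Int) := by
  have hinf : sub <:+: s := (pvInfix_iff_drop sub s).mpr ⟨j, h1⟩
  have h0 : 0 ≤ PySem.Chars.find s sub := (PySem.Chars.find_nonneg_iff s sub).mpr hinf
  obtain ⟨hpre, hmin⟩ := PySem.Chars.find_spec h0
  have hEq : (PySem.Chars.find s sub).toNat = j := by
    rcases Nat.lt_trichotomy (PySem.Chars.find s sub).toNat j with h | h | h
    · exact absurd hpre (h2 _ h)
    · exact h
    · exact absurd h1 (hmin j h)
  omega

theorem pvNo_occ_early (a t p : List Char) (ha : '\n' ∉ a) :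
    ∀ i < a.length, ¬ ('\n' :: p) <+: (a ++ t).drop i := by
  intro i hi hpre
  rw [List.drop_append_of_le_length (Nat.le_of_lt hi)] at hpre
  cases hd : a.drop i with
  | nil =>
      have : a.length ≤ i := by
        have := congrArg List.length hd
        simp [List.length_drop] at this
        omega
      omega
  | cons c rest =>
      have hc : c ∈ a := (List.drop_subset i a) (hd ▸ List.mem_cons_self ..)
      rw [hd] at hpre
      obtain ⟨hx, -⟩ := List.cons_prefix_cons.mp (by simpa using hpre)
      exact ha (hx ▸ hc)

theorem pvFind_no_nl (cs p : List Char) (h : '\n' ∉ cs) :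
    PySem.Chars.find cs ('\n' :: p) = -1 := by
  rw [PySem.Chars.find_eq_neg_one_iff]
  intro hinf
  exact h (hinf.subset (List.mem_cons_self ..))

theorem pvFind_app_head (a b p : List Char) (ha : '\n' ∉ a) (hpb : p <+: b) :
    PySem.Chars.find (a ++ '\n' :: b) ('\n' :: p) = (a.length : Int) := by
  apply pvFind_eq_of
  · rw [List.drop_left]
    exact List.cons_prefix_cons.mpr ⟨rfl, hpb⟩
  · exact pvNo_occ_early a _ p ha

theorem pvDrop_mid (a b : List Char) (m : Nat) :
    (a ++ '\n' :: b).drop (a.length + 1 + m) = b.drop m := by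
  have : a.length + 1 + m = a.length + (1 + m) := by omega
  rw [this, List.drop_length_add_append]
  simp [Nat.add_comm 1 m]

theorem pvFind_app_none (a b p : List Char) (ha : '\n' ∉ a) (hpb : ¬ p <+: b)
    (hb : PySem.Chars.find b ('\n' :: p) = -1) :
    PySem.Chars.find (a ++ '\n' :: b) ('\n' :: p) = -1 := by
  rw [PySem.Chars.find_eq_neg_one_iff]
  intro hinf
  obtain ⟨j, hj⟩ := (pvInfix_iff_drop _ _).mp hinf
  rcases Nat.lt_trichotomy j a.length with h | h | h
  · exact pvNo_occ_early a _ p ha j h hj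
  · subst h
    rw [List.drop_left] at hj
    exact hpb (List.cons_prefix_cons.mp hj).2
  · have hj' : ('\n' :: p) <+: b.drop (j - a.length - 1) := by
      have hrw : j = a.length + 1 + (j - a.length - 1) := by omega
      rw [hrw, pvDrop_mid] at hj
      exact hj
    have : ('\n' :: p) <:+: b := (pvInfix_iff_drop _ _).mpr ⟨_, hj'⟩
    exact (PySem.Chars.find_eq_neg_one_iff b ('\n' :: p)).mp hb this

theorem pvFind_app_pos (a b p : List Char) (ha : '\n' ∉ a) (hpb : ¬ p <+: b)
    (jb : Nat) (hb : PySem.Chars.find b ('\n' :: p) = (jb : Int)) :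
    PySem.Chars.find (a ++ '\n' :: b) ('\n' :: p) = ((a.length + 1 + jb : Nat) : Int) := by
  have h0 : 0 ≤ PySem.Chars.find b ('\n' :: p) := by rw [hb]; positivity
  obtain ⟨hpre, hmin⟩ := PySem.Chars.find_spec h0
  rw [hb] at hpre hmin
  simp only [Int.toNat_natCast] at hpre hmin
  apply pvFind_eq_of
  · rw [pvDrop_mid]; exact hpre
  · intro i hi
    rcases Nat.lt_trichotomy i a.length with h | h | h
    · exact pvNo_occ_early a _ p ha i h
    · subst h
      rw [List.drop_left]
      intro hcon
      exact hpb (List.cons_prefix_cons.mp hcon).2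
    · have hrw : i = a.length + 1 + (i - a.length - 1) := by omega
      rw [hrw, pvDrop_mid]
      exact hmin _ (by omega)

-- A's scan, value-level: the first suffix of the tail whose head line matches
def pvScan : List (List Char) → Option (List (List Char))
  | [] => none
  | l :: rest => if PySem.Chars.startswith l pvMarker then some (l :: rest) else pvScan rest

theorem pvFirstIdx_none : ∀ (tail : List (List Char)), pvScan tail = none →
    ∀ i, pvFirstIdx tail i = 0 := by
  intro tail
  induction tail with
  | nil => intro _ i; simp [pvFirstIdx]
  | cons l rest ih =>
      intro h i
      by_cases hs : PySem.Chars.startswith l pvMarker = true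
      · simp [pvScan, hs] at h
      · simp only [pvScan, hs, Bool.false_eq_true, if_false] at h
        simp [pvFirstIdx, hs, ih h]

theorem pvFirstIdx_some : ∀ (tail suf : List (List Char)), pvScan tail = some suf →
    ∀ i, ∃ k, pvFirstIdx tail i = i + k ∧ tail.drop k = suf := by
  intro tail
  induction tail with
  | nil => intro suf h; simp [pvScan] at h
  | cons l rest ih =>
      intro suf h i
      by_cases hs : PySem.Chars.startswith l pvMarker = true
      · simp only [pvScan, hs, if_true, Option.some.injEq] at h
        exact ⟨0, by simp [pvFirstIdx, hs], by simp [h]⟩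
      · simp only [pvScan, hs, Bool.false_eq_true, if_false] at h
        obtain ⟨k, hk, hd⟩ := ih suf h (i + 1)
        exact ⟨k + 1, by simp [pvFirstIdx, hs]; omega, by simpa using hd⟩

theorem pvMarker_no_nl : '\n' ∉ pvMarker := by decide

-- the crux: B's (startswith, find) data matches A's (head line, scan of the tail) data
theorem pvCrux : ∀ (n : Nat) (cs : List Char), cs.length ≤ n →
    (PySem.Chars.startswith cs pvMarker
        = PySem.Chars.startswith ((pvSplit cs []).headI) pvMarker)
    ∧ (pvScan (pvSplit cs []).tail = none →
        PySem.Chars.find cs ('\n' :: pvMarker) = -1)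
    ∧ (∀ suf, pvScan (pvSplit cs []).tail = some suf →
        ∃ jn : Nat, PySem.Chars.find cs ('\n' :: pvMarker) = (jn : Int)
          ∧ cs.drop (jn + 1) = PySem.Chars.join ['\n'] suf) := by
  intro n
  induction n with
  | zero =>
      intro cs hl
      have : cs = [] := List.eq_nil_of_length_eq_zero (Nat.le_zero.mp hl)
      subst this
      refine ⟨by simp [pvSplit], fun _ => pvFind_no_nl [] _ (by simp), ?_⟩
      intro suf h
      simp [pvSplit, pvScan] at h
  | succ n ih =>
      intro cs hl
      by_cases hm : '\n' ∈ cs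
      · obtain ⟨a, b, rfl, ha⟩ := pvExists_split cs hm
        have hsplit : pvSplit (a ++ '\n' :: b) [] = a :: pvSplit b [] := by
          rw [pvSplit_append a b [] ha]; simp
        have hbl : b.length ≤ n := by
          have := hl; simp [List.length_append] at this; omega
        obtain ⟨ih1, ih2, ih3⟩ := ih b hbl
        refine ⟨?_, ?_, ?_⟩
        · rw [hsplit]
          simp only [List.headI]
          rw [Bool.eq_iff_iff, PySem.Chars.startswith_iff, PySem.Chars.startswith_iff]
          exact pvPrefix_head_nl a pvMarker b pvMarker_no_nl ha
        · rw [hsplit]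
          simp only [List.tail_cons]
          cases hb0 : pvSplit b [] with
          | nil => exact absurd hb0 (pvSplit_ne_nil b [])
          | cons b0 btail =>
              intro hscan
              by_cases hsb : PySem.Chars.startswith b0 pvMarker = true
              · simp [pvScan, hsb] at hscan
              · simp only [pvScan, hsb, Bool.false_eq_true, if_false] at hscan
                have hpb : ¬ pvMarker <+: b := by
                  rw [← PySem.Chars.startswith_iff, ih1, hb0]
                  simp [List.headI, hsb]
                have hfb : PySem.Chars.find b ('\n' :: pvMarker) = -1 := by
                  apply ih2; rw [hb0]; simpa using hscan
                exact pvFind_app_none a b pvMarker ha hpb hfb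
        · rw [hsplit]
          simp only [List.tail_cons]
          cases hb0 : pvSplit b [] with
          | nil => exact absurd hb0 (pvSplit_ne_nil b [])
          | cons b0 btail =>
              intro suf hscan
              by_cases hsb : PySem.Chars.startswith b0 pvMarker = true
              · simp only [pvScan, hsb, if_true, Option.some.injEq] at hscan
                have hpb : pvMarker <+: b := by
                  rw [← PySem.Chars.startswith_iff, ih1, hb0]
                  simp [List.headI, hsb]
                refine ⟨a.length, pvFind_app_head a b pvMarker ha hpb, ?_⟩
                have hd : (a ++ '\n' :: b).drop (a.length + 1) = b := by
                  have h0 := pvDrop_mid a b 0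
                  simp only [List.drop_zero] at h0
                  exact h0
                rw [hd, ← hscan, ← hb0, pvJoin_pvSplit]
                simp
              · simp only [pvScan, hsb, Bool.false_eq_true, if_false] at hscan
                have hpb : ¬ pvMarker <+: b := by
                  rw [← PySem.Chars.startswith_iff, ih1, hb0]
                  simp [List.headI, hsb]
                obtain ⟨jb, hjb, hdb⟩ := ih3 suf (by rw [hb0]; simpa using hscan)
                refine ⟨a.length + 1 + jb, pvFind_app_pos a b pvMarker ha hpb jb hjb, ?_⟩
                have : a.length + 1 + jb + 1 = a.length + 1 + (jb + 1) := by omega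
                rw [this, pvDrop_mid]
                exact hdb
      · refine ⟨?_, fun _ => pvFind_no_nl cs _ hm, ?_⟩
        · rw [pvSplit_no_nl cs [] hm]; simp [List.headI]
        · intro suf h
          rw [pvSplit_no_nl cs [] hm] at h
          simp [pvScan] at h

-- ===== VERDICT (by name: the statement is the Claim_ definition above) =====
theorem generate_latest_content_py_spec : Claim_equal_generate_latest_content_py := by
  intro content _
  unfold Spec_generate_latest_content_py
  unfold generate_latest_content_py generate_latest_content_py_alt
  simp only [pvSplitOn_eq]
  set cs := content.toList with hcs
  obtain ⟨h1, h2, h3⟩ := pvCrux cs.length cs le_rfl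
  cases hsp : pvSplit cs [] with
  | nil => exact absurd hsp (pvSplit_ne_nil cs [])
  | cons l0 tail =>
      rw [hsp] at h1 h2 h3
      simp only [List.headI, List.tail_cons] at h1 h2 h3
      by_cases hs0 : PySem.Chars.startswith l0 pvMarker = true
      · -- marker on line 0: both return content
        simp [pvFirstIdx, hs0, h1]
      · have hguard : PySem.Chars.startswith cs pvMarker = false := by
          rw [h1]; simpa using hs0
        simp only [hguard, Bool.false_eq_true, if_false]
        cases hscan : pvScan tail with
        | none =>
            have hsi : pvFirstIdx (l0 :: tail) 0 = 0 := by
              simp [pvFirstIdx, hs0, pvFirstIdx_none tail hscan]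
            rw [hsi]
            simp [h2 hscan]
        | some suf =>
            obtain ⟨k, hk, hd⟩ := pvFirstIdx_some tail suf hscan 1
            have hsi : pvFirstIdx (l0 :: tail) 0 = 1 + k := by
              simp [pvFirstIdx, hs0, hk]
            obtain ⟨jn, hjn, hjd⟩ := h3 suf hscan
            rw [hsi, hjn]
            have hne : ((jn : Int) ≠ -1) := by omega
            simp only [hne, if_true, ne_eq, not_false_eq_true]
            have hdrop : (l0 :: tail).drop (1 + k) = suf := by
              rw [Nat.add_comm 1 k, List.drop_succ_cons] at *
              exact hd
            have hslice : PySem.Chars.slice cs (some ((jn : Int) + 1)) none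
                = cs.drop (jn + 1) := by
              rw [PySem.Chars.slice_eq_listSlice]
              have : ((jn : Int) + 1) = ((jn + 1 : Nat) : Int) := by push_cast; ring
              rw [this, PySem.List.slice_from_natCast]
            rw [hdrop, hslice, hjd]
            simp
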